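-- pv_equiv track=rewrite | github.com/chm3778/Paradox_Mod_Translator | core/model_manager.py | _filter_and_sort_models
-- ===== SOURCE A (Python) =====
-- from typing import List, Optional, Dict, Any
--
-- def _filter_and_sort_models(models: List[str]) -> List[str]:
--     """
--     过滤和排序模型列表
--
--     Args:
--         models: 原始模型列表
--
--     Returns:
--         过滤和排序后的模型列表
--     """
--     # 过滤出Gemini模型
--     gemini_models = [model for model in models if 'gemini' in model.lower()]
--
--     # 按优先级排序
--     priority_order = [
--         'gemini-1.5-flash-latest',
--         'gemini-1.5-pro-latest',
--         'gemini-2.0-flash-lite',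
--         'gemini-2.0-flash',
--         'gemini-1.5-flash',
--         'gemini-1.5-pro'
--     ]
--
--     sorted_models = []
--
--     # 首先添加优先级模型
--     for priority_model in priority_order:
--         for model in gemini_models:
--             if priority_model in model:
--                 if model not in sorted_models:
--                     sorted_models.append(model)
--
--     # 然后添加其他模型
--     for model in gemini_models:
--         if model not in sorted_models:
--             sorted_models.append(model)
--
--     return sorted_models
-- ===== SOURCE B (Python) =====
-- def _filter_and_sort_models(models):
--     priority_order = [
--         'gemini-1.5-flash-latest',
--         'gemini-1.5-pro-latest',
--         'gemini-2.0-flash-lite',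
--         'gemini-2.0-flash',
--         'gemini-1.5-flash',
--         'gemini-1.5-pro'
--     ]
--
--     def rank(model):
--         for i, p in enumerate(priority_order):
--             if p in model:
--                 return i
--         return len(priority_order)
--
--     deduped = dict.fromkeys(m for m in models if 'gemini' in m.lower())
--     return sorted(deduped, key=rank)
-- ===== Notes on version B (the rewrite author's own statement) =====
-- stated objective: simpler
-- what changed: Replaces A's nested priority-scan-and-append loops with their repeated list-membership dedup by one dict-based dedup of the gemini models followed by a single stable sort keyed on the index of the first matching priority substring (unmatched models keyed last).
import Mathlib
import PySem

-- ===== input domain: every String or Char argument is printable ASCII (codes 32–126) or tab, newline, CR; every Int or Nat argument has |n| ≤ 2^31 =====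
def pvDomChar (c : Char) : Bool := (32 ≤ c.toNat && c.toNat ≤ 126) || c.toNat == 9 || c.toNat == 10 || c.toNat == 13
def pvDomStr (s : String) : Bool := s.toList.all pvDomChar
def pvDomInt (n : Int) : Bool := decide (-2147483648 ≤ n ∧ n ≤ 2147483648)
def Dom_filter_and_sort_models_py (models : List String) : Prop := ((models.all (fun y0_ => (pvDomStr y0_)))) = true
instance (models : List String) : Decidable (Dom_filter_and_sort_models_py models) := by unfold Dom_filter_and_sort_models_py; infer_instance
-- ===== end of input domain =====

-- B replaces A's nested priority-scan-and-append loops (with list-membership dedup) by one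
-- dict-based dedup plus a single stable sort keyed on the first matching priority index.

-- ===== PORT A =====
def pvPriorityOrder : List String :=
  ["gemini-1.5-flash-latest", "gemini-1.5-pro-latest", "gemini-2.0-flash-lite",
   "gemini-2.0-flash", "gemini-1.5-flash", "gemini-1.5-pro"]

def filter_and_sort_models_py (models : List String) : List String :=
  let gemini_models := models.filter (fun model => PySem.Str.isIn "gemini" (PySem.Str.lower model))
  let sorted_models : List String := []
  let sorted_models := pvPriorityOrder.foldl (fun sorted_models priority_model =>
    gemini_models.foldl (fun sorted_models model =>
      if PySem.Str.isIn priority_model model then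
        (if sorted_models.contains model then sorted_models else sorted_models ++ [model])
      else sorted_models) sorted_models) sorted_models
  gemini_models.foldl (fun sorted_models model =>
    if sorted_models.contains model then sorted_models else sorted_models ++ [model]) sorted_models

-- ===== PORT B =====
-- rank(model): for i, p in enumerate(priority_order): if p in model: return i; return len(priority_order)
def pvRankGo (model : String) : List (Int × String) → Int → Int
  | [], dflt => dflt
  | (i, p) :: rest, dflt => if PySem.Str.isIn p model then i else pvRankGo model rest dflt

def pvRank (model : String) : Int :=
  pvRankGo model (PySem.List.enumerate pvPriorityOrder) (pvPriorityOrder.length : Int)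

def filter_and_sort_models_py_alt (models : List String) : List String :=
  let deduped := PySem.List.dedup (models.filter (fun m => PySem.Str.isIn "gemini" (PySem.Str.lower m)))
  PySem.List.sorted deduped pvRank

-- ===== PRECONDITION & SPEC =====
def Spec_filter_and_sort_models_py (models : List String) (out : List String) : Prop := out = filter_and_sort_models_py_alt models
instance (models : List String) (out : List String) : Decidable (Spec_filter_and_sort_models_py models out) := by unfold Spec_filter_and_sort_models_py; infer_instance

-- ===== CLAIM (what is proved, stated in full; the proofs are below) =====
def Claim_equal_filter_and_sort_models_py : Prop := ∀ (models : List String), Dom_filter_and_sort_models_py models → Spec_filter_and_sort_models_py models (filter_and_sort_models_py models)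

-- ===== LEMMAS AND PROOFS =====

-- A's 'append if unseen' loops, as structural recursion with an explicit avoid-list
def pvCore (q : String → Bool) (avoid : List String) : List String → List String
  | [] => []
  | x :: xs => if q x && !avoid.contains x then x :: pvCore q (x :: avoid) xs else pvCore q avoid xs

lemma pvCore_congr (q : String → Bool) :
    ∀ (xs avoid avoid' : List String),
      (∀ m ∈ xs, q m = true → (m ∈ avoid ↔ m ∈ avoid')) →
      pvCore q avoid xs = pvCore q avoid' xs := by
  intro xs
  induction xs with
  | nil => intro _ _ _; rfl
  | cons x xs ih =>
      intro avoid avoid' h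
      rw [pvCore, pvCore]
      by_cases hq : q x = true
      · have hx := h x List.mem_cons_self hq
        by_cases hc : x ∈ avoid'
        · simp only [hq, (by simpa using hx.mpr hc : avoid.contains x = true),
            (by simpa using hc : avoid'.contains x = true)]
          simp only [Bool.not_true, Bool.and_false, Bool.false_eq_true, if_false]
          exact ih avoid avoid' (fun m hm hqm => h m (List.mem_cons_of_mem _ hm) hqm)
        · have hc' : ¬ x ∈ avoid := fun hh => hc (hx.mp hh)
          simp only [hq, (by simpa using hc' : avoid.contains x = false),
            (by simpa using hc : avoid'.contains x = false)]
          simp only [Bool.not_false, Bool.and_true, if_true]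
          rw [ih (x :: avoid) (x :: avoid')
            (fun m hm hqm => by
              simp only [List.mem_cons]
              exact or_congr Iff.rfl (h m (List.mem_cons_of_mem _ hm) hqm))]
      · have hq' : q x = false := by simpa using hq
        simp only [hq', Bool.false_and, Bool.false_eq_true, if_false]
        exact ih avoid avoid' (fun m hm hqm => h m (List.mem_cons_of_mem _ hm) hqm)

lemma pvCore_mem {m : String} {q : String → Bool} :
    ∀ {avoid xs : List String}, m ∈ pvCore q avoid xs → m ∈ xs := by
  intro avoid xs
  induction xs generalizing avoid with
  | nil => intro h; simp [pvCore] at h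
  | cons x xs ih =>
      intro h
      rw [pvCore] at h
      by_cases hc : (q x && !avoid.contains x) = true
      · rw [if_pos hc] at h
        rcases List.mem_cons.mp h with h1 | h1
        · exact h1 ▸ List.mem_cons_self
        · exact List.mem_cons_of_mem _ (ih h1)
      · rw [if_neg hc] at h
        exact List.mem_cons_of_mem _ (ih h)

lemma pvCore_not_mem {m : String} {q : String → Bool} :
    ∀ {avoid xs : List String}, m ∈ avoid → m ∉ pvCore q avoid xs := by
  intro avoid xs
  induction xs generalizing avoid with
  | nil => intro _ h; simp [pvCore] at h
  | cons x xs ih =>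
      intro hc h
      rw [pvCore] at h
      by_cases hcond : (q x && !avoid.contains x) = true
      · rw [if_pos hcond] at h
        rcases List.mem_cons.mp h with h1 | h1
        · subst h1
          simp [hc] at hcond
        · exact ih (List.mem_cons_of_mem _ hc) h1
      · rw [if_neg hcond] at h
        exact ih hc h

lemma pvFoldl_core (xs : List String) (q : String → Bool) :
    ∀ acc : List String,
      xs.foldl (fun a m => if q m then (if a.contains m then a else a ++ [m]) else a) acc
        = acc ++ pvCore q acc xs := by
  induction xs with
  | nil => intro acc; simp [pvCore]
  | cons x xs ih =>
      intro acc
      rw [List.foldl_cons, pvCore]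
      by_cases hq : q x = true
      · by_cases hc : acc.contains x = true
        · simp only [hq, hc, if_true, Bool.not_true, Bool.and_false, Bool.false_eq_true, if_false]
          exact ih acc
        · have hc' : acc.contains x = false := by simpa using hc
          simp only [hq, hc', if_true, Bool.false_eq_true, if_false, Bool.not_false, Bool.and_true]
          rw [ih (acc ++ [x]),
            pvCore_congr q xs (acc ++ [x]) (x :: acc) (fun m _ _ => by simp [or_comm]),
            List.append_assoc]
          rfl
      · have hq' : q x = false := by simpa using hq
        simp only [hq', Bool.false_eq_true, if_false, Bool.false_and]
        exact ih acc

lemma pvFoldl_core_true (xs : List String) (acc : List String) :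
    xs.foldl (fun a m => if a.contains m then a else a ++ [m]) acc
      = acc ++ pvCore (fun _ => true) acc xs := by
  have h := pvFoldl_core xs (fun _ => true) acc
  simpa using h

lemma pvCore_eq_filter (q : String → Bool) :
    ∀ (xs avoid t : List String),
      (∀ m ∈ t, (q m && !avoid.contains m) = false) →
      pvCore q avoid xs
        = (pvCore (fun _ => true) t xs).filter (fun m => q m && !avoid.contains m) := by
  intro xs
  induction xs with
  | nil => intro _ _ _; rfl
  | cons x xs ih =>
      intro avoid t ht
      rw [pvCore, pvCore]
      by_cases htx : x ∈ t
      · have hcx : t.contains x = true := by simpa using htx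
        have hfx := ht x htx
        simp only [hcx, Bool.not_true, Bool.and_false, Bool.false_eq_true, if_false,
          hfx]
        exact ih avoid t ht
      · have hcx : t.contains x = false := by simpa using htx
        simp only [hcx, Bool.not_false, Bool.and_true, if_true, List.filter_cons]
        by_cases hqx : (q x && !avoid.contains x) = true
        · simp only [hqx, if_true]
          rw [ih (x :: avoid) (x :: t)
            (fun m hm => by
              rcases List.mem_cons.mp hm with h | h
              · subst h; simp
              · have := ht m h
                cases hqm : q m
                · simp
                · simp only [hqm, Bool.true_and] at this ⊢
                  have : m ∈ avoid := by simpa using this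
                  simp [this])]
          congr 1
          apply List.filter_congr
          intro m hm
          have hmx : ¬ (m = x) := by
            intro he
            exact pvCore_not_mem (he ▸ List.mem_cons_self) hm
          simp [hmx]
        · have hqx' : (q x && !avoid.contains x) = false := by simpa using hqx
          simp only [hqx', Bool.false_eq_true, if_false]
          exact ih avoid (x :: t)
            (fun m hm => by
              rcases List.mem_cons.mp hm with h | h
              · subst h; exact hqx'
              · exact ht m h)

lemma pvDedup_eq_core (xs : List String) :
    PySem.List.dedup xs = pvCore (fun _ => true) [] xs := by
  have h : PySem.List.dedup xs = xs.foldl PySem.Set.add [] := by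
    simp [PySem.List.dedup, PySem.Set.ofList_eq_foldl]
  rw [h]
  have h2 : xs.foldl PySem.Set.add []
      = xs.foldl (fun a m => if a.contains m then a else a ++ [m]) [] := by
    apply PySem.List.foldl_congr_mem
    intro acc m _
    simp [PySem.Set.add]
  rw [h2, pvFoldl_core_true]
  simp

def pvBuck (D : List String) (j : Nat) : List String :=
  (List.range j).flatMap (fun (i : Nat) => D.filter (fun m => pvRank m == (i : Int)))

lemma pvBuck_succ (D : List String) (j : Nat) :
    pvBuck D j ++ D.filter (fun m => pvRank m == (j : Int)) = pvBuck D (j + 1) := by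
  simp [pvBuck, List.range_succ]

lemma pvRank_eq_ifs (m : String) :
    pvRank m =
      if PySem.Str.isIn "gemini-1.5-flash-latest" m then 0
      else if PySem.Str.isIn "gemini-1.5-pro-latest" m then 1
      else if PySem.Str.isIn "gemini-2.0-flash-lite" m then 2
      else if PySem.Str.isIn "gemini-2.0-flash" m then 3
      else if PySem.Str.isIn "gemini-1.5-flash" m then 4
      else if PySem.Str.isIn "gemini-1.5-pro" m then 5
      else 6 := by
  rw [pvRank, pvPriorityOrder]
  simp only [PySem.List.enumerate_cons, PySem.List.enumerate_nil]
  norm_num [pvRankGo]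
  rfl

lemma pvRank_nonneg (m : String) : 0 ≤ pvRank m := by
  rw [pvRank_eq_ifs]; split_ifs <;> omega

lemma pvRank_le (m : String) : pvRank m ≤ 6 := by
  rw [pvRank_eq_ifs]; split_ifs <;> omega

lemma pvMem_buck (D : List String) (j : Nat) (m : String) :
    m ∈ pvBuck D j ↔ (m ∈ D ∧ pvRank m < (j : Int)) := by
  have h0 := pvRank_nonneg m
  simp only [pvBuck, List.mem_flatMap, List.mem_range, List.mem_filter, beq_iff_eq]
  constructor
  · rintro ⟨i, hi, hm, he⟩
    exact ⟨hm, by omega⟩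
  · rintro ⟨hm, hl⟩
    exact ⟨(pvRank m).toNat, by omega, hm, by omega⟩

lemma pvRank_char (j : Nat) (hj : j < 6) (p : String) (hp : pvPriorityOrder[j]? = some p)
    (m : String) :
    (PySem.Str.isIn p m && !decide (pvRank m < (j : Int))) = (pvRank m == (j : Int)) := by
  interval_cases j <;>
    (simp only [pvPriorityOrder, List.getElem?_cons_zero, List.getElem?_cons_succ,
       Option.some.injEq] at hp
     subst hp
     rw [pvRank_eq_ifs]
     split_ifs <;> simp_all)

-- generic step: one 'scan gemini_models, append the unseen matches' pass
lemma pvCore_step (gem D acc : List String) (q r : String → Bool)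
    (hD : D = pvCore (fun _ => true) [] gem)
    (hacc : ∀ m ∈ gem, acc.contains m = (decide (m ∈ D) && r m)) :
    pvCore q acc gem = D.filter (fun m => q m && !r m) := by
  rw [pvCore_eq_filter q gem acc [] (fun m hm => by simp at hm), ← hD]
  apply List.filter_congr
  intro m hm
  have hmg : m ∈ gem := pvCore_mem (hD ▸ hm)
  rw [hacc m hmg, decide_eq_true hm]
  simp

-- B's stable sort: inserting into a list split as (keys ≤ key x) ++ (keys > key x)
lemma pvInsertBy_middle {α : Type} (before : α → α → Bool) (x : α) :
    ∀ (L1 L2 : List α), (∀ y ∈ L1, before x y = false) → (∀ y ∈ L2, before x y = true) →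
      PySem.List.insertBy before x (L1 ++ L2) = L1 ++ x :: L2 := by
  intro L1
  induction L1 with
  | nil =>
      intro L2 _ h2
      cases L2 with
      | nil => rfl
      | cons y t => simp [PySem.List.insertBy, h2 y List.mem_cons_self]
  | cons z L1 ih =>
      intro L2 h1 h2
      simp [PySem.List.insertBy, h1 z List.mem_cons_self,
        ih L2 (fun y hy => h1 y (List.mem_cons_of_mem _ hy)) h2]

lemma pvBuck_insert (p : List String) (x : String) :
    PySem.List.insertBy (fun a b => decide (pvRank a < pvRank b)) x (pvBuck p 7)
      = pvBuck (p ++ [x]) 7 := by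
  have h0 := pvRank_nonneg x
  have h6 := pvRank_le x
  set r : Nat := (pvRank x).toNat with hr
  have hrx : (r : Int) = pvRank x := by omega
  have hsplit : List.range 7 = List.range (r + 1) ++ (List.range (7 - (r + 1))).map (fun i => (r + 1) + i) := by
    rw [← List.range_add]
    congr 1
    omega
  have hbuck : ∀ (D : List String), pvBuck D 7 =
      (List.range (r + 1)).flatMap (fun (i : Nat) => D.filter (fun m => pvRank m == (i : Int)))
      ++ ((List.range (7 - (r + 1))).map (fun i => (r + 1) + i)).flatMap
           (fun (i : Nat) => D.filter (fun m => pvRank m == (i : Int))) := by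
    intro D
    rw [pvBuck, hsplit, List.flatMap_append]
  rw [hbuck p, pvInsertBy_middle _ x _ _
    (fun y hy => by
      simp only [List.mem_flatMap, List.mem_range, List.mem_filter, beq_iff_eq] at hy
      obtain ⟨i, hi, _, he⟩ := hy
      simp only [decide_eq_false_iff_not, not_lt]
      omega)
    (fun y hy => by
      simp only [List.mem_flatMap, List.mem_map, List.mem_range, List.mem_filter, beq_iff_eq] at hy
      obtain ⟨i, ⟨j, _, hji⟩, _, he⟩ := hy
      simp only [decide_eq_true_eq]
      omega)]
  rw [hbuck (p ++ [x])]
  have hfilter : ∀ (i : Nat), (p ++ [x]).filter (fun m => pvRank m == (i : Int))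
      = p.filter (fun m => pvRank m == (i : Int)) ++ (if i = r then [x] else []) := by
    intro i
    rw [List.filter_append]
    congr 1
    by_cases hi : i = r
    · subst hi; simp [List.filter, hrx]
    · have : ¬ (pvRank x == (i : Int)) = true := by
        simp only [beq_iff_eq]; omega
      simp [List.filter, this]
      simp_all
  have hL2 : ((List.range (7 - (r + 1))).map (fun i => (r + 1) + i)).flatMap
        (fun (i : Nat) => (p ++ [x]).filter (fun m => pvRank m == (i : Int)))
      = ((List.range (7 - (r + 1))).map (fun i => (r + 1) + i)).flatMap
        (fun (i : Nat) => p.filter (fun m => pvRank m == (i : Int))) := by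
    apply List.flatMap_congr
    intro i hi
    simp only [List.mem_map, List.mem_range] at hi
    obtain ⟨j, _, hji⟩ := hi
    rw [hfilter i, if_neg (by omega), List.append_nil]
  have hL1 : (List.range (r + 1)).flatMap
        (fun (i : Nat) => (p ++ [x]).filter (fun m => pvRank m == (i : Int)))
      = (List.range (r + 1)).flatMap
        (fun (i : Nat) => p.filter (fun m => pvRank m == (i : Int))) ++ [x] := by
    rw [List.range_succ, List.flatMap_append, List.flatMap_append]
    have hlast : ([r] : List Nat).flatMap (fun (i : Nat) => (p ++ [x]).filter (fun m => pvRank m == (i : Int)))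
        = ([r] : List Nat).flatMap (fun (i : Nat) => p.filter (fun m => pvRank m == (i : Int))) ++ [x] := by
      simp only [List.flatMap_cons, List.flatMap_nil, List.append_nil]
      rw [hfilter r, if_pos rfl]
    have hpre : (List.range r).flatMap (fun (i : Nat) => (p ++ [x]).filter (fun m => pvRank m == (i : Int)))
        = (List.range r).flatMap (fun (i : Nat) => p.filter (fun m => pvRank m == (i : Int))) := by
      apply List.flatMap_congr
      intro i hi
      simp only [List.mem_range] at hi
      rw [hfilter i, if_neg (by omega), List.append_nil]
    rw [hlast, hpre, List.append_assoc]
  rw [hL1, hL2, List.append_assoc]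
  rfl

lemma pvSorted_eq_buck (D : List String) :
    PySem.List.sorted D pvRank = pvBuck D 7 := by
  rw [PySem.List.sorted_eq_foldl_insertBy]
  induction D using List.reverseRecOn with
  | nil => simp [pvBuck]
  | append_singleton p x ih =>
      rw [List.foldl_append, List.foldl_cons, List.foldl_nil, ih, pvBuck_insert]

-- ===== VERDICT (by name: the statement is the Claim_ definition above) =====
theorem filter_and_sort_models_py_spec : Claim_equal_filter_and_sort_models_py := by
  intro models _
  simp only [Spec_filter_and_sort_models_py, filter_and_sort_models_py,
    filter_and_sort_models_py_alt]
  set gem := models.filter (fun m => PySem.Str.isIn "gemini" (PySem.Str.lower m)) with hgem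
  set D := pvCore (fun _ => true) [] gem with hD
  have haccj : ∀ j : Nat, ∀ m ∈ gem,
      (pvBuck D j).contains m = (decide (m ∈ D) && decide (pvRank m < (j : Int))) := by
    intro j m _
    rw [Bool.eq_iff_iff]
    simp [pvMem_buck D j m]
  have hstep : ∀ j : Nat, j < 6 → ∀ p : String, pvPriorityOrder[j]? = some p →
      gem.foldl (fun a m => if PySem.Str.isIn p m then
          (if a.contains m then a else a ++ [m]) else a) (pvBuck D j) = pvBuck D (j + 1) := by
    intro j hj p hp
    rw [pvFoldl_core gem (fun m => PySem.Str.isIn p m) (pvBuck D j)]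
    rw [pvCore_step gem D (pvBuck D j) (fun m => PySem.Str.isIn p m)
      (fun m => decide (pvRank m < (j : Int))) hD (haccj j)]
    rw [List.filter_congr (fun m _ => pvRank_char j hj p hp m)]
    exact pvBuck_succ D j
  have hfinal : gem.foldl (fun a m => if a.contains m then a else a ++ [m]) (pvBuck D 6)
      = pvBuck D 7 := by
    rw [pvFoldl_core_true gem (pvBuck D 6)]
    rw [pvCore_step gem D (pvBuck D 6) (fun _ => true)
      (fun m => decide (pvRank m < ((6 : Nat) : Int))) hD (haccj 6)]
    rw [List.filter_congr (fun m _ => show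
        ((fun (_ : String) => true) m && !decide (pvRank m < ((6 : Nat) : Int)))
          = (pvRank m == ((6 : Nat) : Int)) from by
      have h1 := pvRank_le m
      rw [Bool.eq_iff_iff]
      simp only [Bool.true_and, Bool.not_eq_eq_eq_not, Bool.not_true, decide_eq_false_iff_not,
        not_lt, beq_iff_eq, decide_eq_false_iff_not]
      constructor
      · intro h2; omega
      · intro h2; omega)]
    exact pvBuck_succ D 6
  have h0 : gem.foldl (fun a m => if PySem.Str.isIn "gemini-1.5-flash-latest" m then
      (if a.contains m then a else a ++ [m]) else a) ([] : List String) = pvBuck D 1 :=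
    hstep 0 (by omega) _ rfl
  simp only [pvPriorityOrder, List.foldl_cons, List.foldl_nil]
  rw [h0, hstep 1 (by omega) "gemini-1.5-pro-latest" rfl,
    hstep 2 (by omega) "gemini-2.0-flash-lite" rfl,
    hstep 3 (by omega) "gemini-2.0-flash" rfl,
    hstep 4 (by omega) "gemini-1.5-flash" rfl,
    hstep 5 (by omega) "gemini-1.5-pro" rfl,
    hfinal]
  rw [pvDedup_eq_core gem, ← hD, pvSorted_eq_buck]
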